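-- pv_equiv track=rewrite | github.com/ilmari99/algorithms | foobar/foobar42/Shot.py | cal_new_direction
-- ===== SOURCE A (Python) =====
-- def cal_new_direction(wall_hits,direction):
--     """Calculates the new direction based on the wall hits.
--     If the beam hits the bounds of the corresponding coordinate, then the direction is reversed in the corresponding direction element.
--     """
--     #new_direction = direction.copy()
--     for i,w in enumerate(wall_hits):
--         if w:
--             # If hits the bottom or top walls, the y direction is reversed
--             if i in [0,2]:
--                 direction[1] = -direction[1]
--             else:
--                 direction[0] = -direction[0]
--     return direction
-- ===== SOURCE B (Python) =====
-- def cal_new_direction(wall_hits, direction):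
--     y_flips = 0
--     x_flips = 0
--     for i, w in enumerate(wall_hits):
--         if w:
--             if i in (0, 2):
--                 y_flips += 1
--             else:
--                 x_flips += 1
--     if y_flips % 2 == 1:
--         direction[1] = -direction[1]
--     if x_flips % 2 == 1:
--         direction[0] = -direction[0]
--     return direction
-- ===== Notes on version B (the rewrite author's own statement) =====
-- stated objective: alternative
-- what changed: Instead of toggling direction components inside the loop on every wall hit, B counts y-hits and x-hits in one scan and applies each negation at most once based on parity.
-- outside the precondition, e.g. on cal_new_direction([True], []): A raises IndexError, B raises IndexError
import Mathlib
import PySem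

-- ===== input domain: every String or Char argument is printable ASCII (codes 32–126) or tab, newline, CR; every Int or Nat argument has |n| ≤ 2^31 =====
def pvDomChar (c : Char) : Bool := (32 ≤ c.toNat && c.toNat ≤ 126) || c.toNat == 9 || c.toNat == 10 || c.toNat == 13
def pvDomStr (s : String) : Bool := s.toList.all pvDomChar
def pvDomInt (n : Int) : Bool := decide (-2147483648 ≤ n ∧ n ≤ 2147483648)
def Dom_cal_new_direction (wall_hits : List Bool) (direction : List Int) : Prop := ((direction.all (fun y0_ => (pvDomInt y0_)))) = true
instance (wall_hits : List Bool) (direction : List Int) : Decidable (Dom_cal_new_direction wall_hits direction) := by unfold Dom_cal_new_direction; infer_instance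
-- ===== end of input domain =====

-- B replaces A's in-loop toggling by one counting pass plus a parity-based single negation
-- (equal return value; both Pythons mutate `direction` in place, the claim is about the return value).

-- negate the element at index j in place (no-op when j is out of range; under Pre_ every
-- negation performed by either program is in range, matching Python exactly there)
def pvNegAt (d : List Int) (j : Nat) : List Int := d.set j (-(d.getD j 0))

-- ===== PORT A =====
def cal_new_direction (wall_hits : List Bool) (direction : List Int) : List Int :=
  (PySem.List.enumerate wall_hits).foldl
    (fun d iw =>
      if iw.2 then
        if iw.1 = 0 ∨ iw.1 = 2 then pvNegAt d 1 else pvNegAt d 0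
      else d)
    direction

-- ===== PORT B =====
def cal_new_direction_alt (wall_hits : List Bool) (direction : List Int) : List Int :=
  let c :=
    (PySem.List.enumerate wall_hits).foldl
      (fun (c : Nat × Nat) iw =>
        if iw.2 then
          if iw.1 = 0 ∨ iw.1 = 2 then (c.1 + 1, c.2) else (c.1, c.2 + 1)
        else c)
      (0, 0)
  let d1 := if c.1 % 2 = 1 then pvNegAt direction 1 else direction
  if c.2 % 2 = 1 then pvNegAt d1 0 else d1

-- ===== PRECONDITION & SPEC =====
-- Pre_ excludes exactly the inputs on which Python A raises IndexError: a truthy hit at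
-- index 0 or 2 with fewer than 2 direction components, or a truthy hit at another index
-- with an empty direction list.
def Pre_cal_new_direction (wall_hits : List Bool) (direction : List Int) : Prop :=
  ((PySem.List.enumerate wall_hits).any (fun p => p.2 && (p.1 == 0 || p.1 == 2)) = true →
      2 ≤ direction.length) ∧
  ((PySem.List.enumerate wall_hits).any (fun p => p.2 && !(p.1 == 0 || p.1 == 2)) = true →
      1 ≤ direction.length)
instance (wall_hits : List Bool) (direction : List Int) : Decidable (Pre_cal_new_direction wall_hits direction) := by unfold Pre_cal_new_direction; infer_instance

def pvWitness_cal_new_direction : List Bool × List Int := ([true, false, true, true], [3, -2])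

def Spec_cal_new_direction (wall_hits : List Bool) (direction : List Int) (out : List Int) : Prop := out = cal_new_direction_alt wall_hits direction
instance (wall_hits : List Bool) (direction : List Int) (out : List Int) : Decidable (Spec_cal_new_direction wall_hits direction out) := by unfold Spec_cal_new_direction; infer_instance

-- ===== CLAIM (what is proved, stated in full; the proofs are below) =====
def Claim_equal_cal_new_direction : Prop := ∀ (wall_hits : List Bool) (direction : List Int), Dom_cal_new_direction wall_hits direction → Pre_cal_new_direction wall_hits direction → Spec_cal_new_direction wall_hits direction (cal_new_direction wall_hits direction)

-- ===== LEMMAS AND PROOFS =====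

theorem pvNegAt_invol (d : List Int) (j : Nat) : pvNegAt (pvNegAt d j) j = d := by
  induction d generalizing j with
  | nil => simp [pvNegAt]
  | cons a t ih =>
    cases j with
    | zero => simp [pvNegAt]
    | succ k =>
      have := ih k
      simpa [pvNegAt] using this

theorem pvNegAt_comm (d : List Int) : pvNegAt (pvNegAt d 1) 0 = pvNegAt (pvNegAt d 0) 1 := by
  match d with
  | [] => simp [pvNegAt]
  | [a] => simp [pvNegAt]
  | a :: b :: t => simp [pvNegAt]

-- the two-parity application B performs after its counting pass
def pvApp (y x : Nat) (d : List Int) : List Int :=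
  let d1 := if y % 2 = 1 then pvNegAt d 1 else d
  if x % 2 = 1 then pvNegAt d1 0 else d1

theorem pvApp_y (y x : Nat) (d : List Int) :
    pvApp y x (pvNegAt d 1) = pvApp (y + 1) x d := by
  unfold pvApp
  rcases Nat.mod_two_eq_zero_or_one y with h | h
  · have h' : (y + 1) % 2 = 1 := by omega
    simp [h, h']
  · have h' : (y + 1) % 2 = 0 := by omega
    simp [h, h', pvNegAt_invol]

theorem pvApp_x (y x : Nat) (d : List Int) :
    pvApp y x (pvNegAt d 0) = pvApp y (x + 1) d := by
  unfold pvApp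
  rcases Nat.mod_two_eq_zero_or_one y with hy | hy <;>
    rcases Nat.mod_two_eq_zero_or_one x with hx | hx
  · have hx' : (x + 1) % 2 = 1 := by omega
    simp [hy, hx, hx']
  · have hx' : (x + 1) % 2 = 0 := by omega
    simp [hy, hx, hx', pvNegAt_invol]
  · have hx' : (x + 1) % 2 = 1 := by omega
    simp [hy, hx, hx', pvNegAt_comm]
  · have hx' : (x + 1) % 2 = 0 := by omega
    simp [hy, hx, hx', pvNegAt_comm, pvNegAt_invol]

-- counts of y-hits / x-hits in a pair list
def pvYC (ps : List (Int × Bool)) : Nat :=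
  (ps.filter (fun p => p.2 && (decide (p.1 = 0) || decide (p.1 = 2)))).length
def pvXC (ps : List (Int × Bool)) : Nat :=
  (ps.filter (fun p => p.2 && !(decide (p.1 = 0) || decide (p.1 = 2)))).length

theorem foldA_eq_app (ps : List (Int × Bool)) (d : List Int) :
    ps.foldl
      (fun d iw =>
        if iw.2 then
          if iw.1 = 0 ∨ iw.1 = 2 then pvNegAt d 1 else pvNegAt d 0
        else d) d
    = pvApp (pvYC ps) (pvXC ps) d := by
  induction ps generalizing d with
  | nil => simp [pvYC, pvXC, pvApp]
  | cons p ps ih =>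
    rcases p with ⟨i, w⟩
    cases w with
    | false => simp [pvYC, pvXC, List.foldl_cons, ih]
    | true =>
      by_cases hy : i = 0 ∨ i = 2
      · simp only [List.foldl_cons, if_pos hy, ih]
        rcases hy with h | h <;> subst h <;>
          simp [pvYC, pvXC, pvApp_y, Nat.add_comm]
      · have h0 : ¬ i = 0 := fun h => hy (Or.inl h)
        have h2 : ¬ i = 2 := fun h => hy (Or.inr h)
        simp only [List.foldl_cons, if_neg hy, ih]
        simp [pvYC, pvXC, h0, h2, pvApp_x, Nat.add_comm]

theorem foldB_counts (ps : List (Int × Bool)) (c : Nat × Nat) :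
    ps.foldl
      (fun (c : Nat × Nat) iw =>
        if iw.2 then
          if iw.1 = 0 ∨ iw.1 = 2 then (c.1 + 1, c.2) else (c.1, c.2 + 1)
        else c) c
    = (c.1 + pvYC ps, c.2 + pvXC ps) := by
  induction ps generalizing c with
  | nil => simp [pvYC, pvXC]
  | cons p ps ih =>
    rcases p with ⟨i, w⟩
    cases w with
    | false => simp [pvYC, pvXC, List.foldl_cons, ih]
    | true =>
      by_cases hy : i = 0 ∨ i = 2
      · simp only [List.foldl_cons, if_pos hy, ih]
        rcases hy with h | h <;> subst h <;>
          (simp [pvYC, pvXC]; omega)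
      · have h0 : ¬ i = 0 := fun h => hy (Or.inl h)
        have h2 : ¬ i = 2 := fun h => hy (Or.inr h)
        simp only [List.foldl_cons, if_neg hy, ih]
        simp [pvYC, pvXC, h0, h2]
        omega

-- ===== VERDICT (by name: the statement is the Claim_ definition above) =====
theorem cal_new_direction_spec : Claim_equal_cal_new_direction := by
  intro wall_hits direction _ _
  unfold Spec_cal_new_direction cal_new_direction cal_new_direction_alt
  rw [foldA_eq_app, foldB_counts]
  simp [pvApp]
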